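-- pv_equiv track=rewrite | github.com/FTDfangge/leetcode | competetion/biweek_102_2.py | findPrefixScore
-- ===== SOURCE A (Python) =====
-- from typing import List
--
-- def findPrefixScore(nums: List[int]) -> List[int]:
--     max_arr = []
--     temp_max = 0
--     conver = []
--     ans = [0]
--     for i in nums:
--         temp_max = max(temp_max, i)
--         max_arr.append(temp_max)
--         conver.append(i + max_arr[-1])
--         ans.append(ans[-1] + conver[-1])
--     return ans[1:]
-- ===== SOURCE B (Python) =====
-- from typing import List
--
-- def findPrefixScore(nums: List[int]) -> List[int]:
--     # Divide and conquer: solve(a, m) returns the prefix scores of a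
--     # (given prior running max m, sums starting from 0) and the final max;
--     # the right half's scores are shifted by the left half's total.
--     def solve(a, m):
--         if not a:
--             return [], m
--         if len(a) == 1:
--             m2 = max(m, a[0])
--             return [a[0] + m2], m2
--         mid = len(a) // 2
--         left, m1 = solve(a[:mid], m)
--         right, m2 = solve(a[mid:], m1)
--         off = left[-1]
--         return left + [off + r for r in right], m2
--     return solve(nums, 0)[0]
-- ===== Notes on version B (the rewrite author's own statement) =====
-- stated objective: alternative
-- what changed: Replaced A's single fused left-to-right loop (four growing lists) with a divide-and-conquer recursion: solve each half, thread the left half's max into the right half, and shift the right half's scores by the left half's last score.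
import Mathlib
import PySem

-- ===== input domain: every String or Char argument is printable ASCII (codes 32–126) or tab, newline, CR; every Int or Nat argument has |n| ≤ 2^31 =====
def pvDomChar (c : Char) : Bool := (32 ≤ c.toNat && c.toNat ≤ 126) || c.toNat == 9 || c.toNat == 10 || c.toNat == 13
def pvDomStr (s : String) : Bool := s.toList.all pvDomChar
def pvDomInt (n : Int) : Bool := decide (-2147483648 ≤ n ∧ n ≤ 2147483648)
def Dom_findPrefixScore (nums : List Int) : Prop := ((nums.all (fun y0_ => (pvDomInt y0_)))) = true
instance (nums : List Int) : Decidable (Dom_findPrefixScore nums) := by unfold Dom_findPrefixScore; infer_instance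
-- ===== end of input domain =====

-- B replaces A's fused left-to-right accumulation with a divide-and-conquer
-- recursion on halves (alternative decomposition; same results, not faster).

-- ===== PORT A =====
-- A's loop over nums carrying the four pieces of state (max_arr, temp_max, conver, ans);
-- ans is always nonempty (it starts as [0]), so list[-1] is rendered as getLastD 0.
def pvALoop (nums : List Int) (max_arr : List Int) (temp_max : Int)
    (conver : List Int) (ans : List Int) : List Int :=
  match nums with
  | [] => ans
  | i :: rest =>
    let temp_max' := max temp_max i
    let max_arr' := max_arr ++ [temp_max']
    let conver' := conver ++ [i + max_arr'.getLastD 0]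
    let ans' := ans ++ [ans.getLastD 0 + conver'.getLastD 0]
    pvALoop rest max_arr' temp_max' conver' ans'

def findPrefixScore (nums : List Int) : List Int :=
  (pvALoop nums [] 0 [] [0]).drop 1    -- ans[1:]

-- ===== PORT B =====
-- solve(a, m): prefix scores of a given prior running max m (sums from 0), and the final max;
-- right half shifted by left[-1] (left is nonempty in that branch, rendered getLastD 0).
def pvSolve (a : List Int) (m : Int) : List Int × Int :=
  match a with
  | [] => ([], m)
  | [x] => ([x + max m x], max m x)
  | x :: y :: rest =>
    let mid := (x :: y :: rest).length / 2
    let L := pvSolve ((x :: y :: rest).take mid) m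
    let R := pvSolve ((x :: y :: rest).drop mid) L.2
    (L.1 ++ R.1.map (fun r => L.1.getLastD 0 + r), R.2)
termination_by a.length
decreasing_by
  · simp [List.length_take]; omega
  · simp [List.length_drop]; omega

def findPrefixScore_alt (nums : List Int) : List Int :=
  (pvSolve nums 0).1

-- ===== PRECONDITION & SPEC =====
def Spec_findPrefixScore (nums : List Int) (out : List Int) : Prop := out = findPrefixScore_alt nums
instance (nums : List Int) (out : List Int) : Decidable (Spec_findPrefixScore nums out) := by unfold Spec_findPrefixScore; infer_instance

-- ===== CLAIM (what is proved, stated in full; the proofs are below) =====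
def Claim_equal_findPrefixScore : Prop := ∀ (nums : List Int), Dom_findPrefixScore nums → Spec_findPrefixScore nums (findPrefixScore nums)

-- ===== LEMMAS AND PROOFS =====

-- reference shapes used only by the proofs
def pvRunMaxFrom (m : Int) : List Int → List Int
  | [] => []
  | x :: xs => (max m x) :: pvRunMaxFrom (max m x) xs

def pvPrefixSumsFrom (s : Int) : List Int → List Int
  | [] => []
  | x :: xs => (s + x) :: pvPrefixSumsFrom (s + x) xs

theorem runMax_length (m : Int) (xs : List Int) :
    (pvRunMaxFrom m xs).length = xs.length := by
  induction xs generalizing m with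
  | nil => rfl
  | cons x xs ih => simp [pvRunMaxFrom, ih]

theorem runMax_append (m : Int) (xs ys : List Int) :
    pvRunMaxFrom m (xs ++ ys) = pvRunMaxFrom m xs ++ pvRunMaxFrom (xs.foldl max m) ys := by
  induction xs generalizing m with
  | nil => simp [pvRunMaxFrom]
  | cons x xs ih => simp [pvRunMaxFrom, ih]

theorem prefixSums_append (s : Int) (xs ys : List Int) :
    pvPrefixSumsFrom s (xs ++ ys)
      = pvPrefixSumsFrom s xs ++ pvPrefixSumsFrom (xs.foldl (· + ·) s) ys := by
  induction xs generalizing s with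
  | nil => simp [pvPrefixSumsFrom]
  | cons x xs ih => simp [pvPrefixSumsFrom, ih]

theorem prefixSums_shift (c s : Int) (xs : List Int) :
    (pvPrefixSumsFrom s xs).map (fun r => c + r) = pvPrefixSumsFrom (c + s) xs := by
  induction xs generalizing s with
  | nil => simp [pvPrefixSumsFrom]
  | cons x xs ih => simp [pvPrefixSumsFrom, ih, add_assoc]

theorem prefixSums_getLastD (s : Int) (xs : List Int) (h : xs ≠ []) :
    (pvPrefixSumsFrom s xs).getLastD 0 = xs.foldl (· + ·) s := by
  induction xs generalizing s with
  | nil => simp at h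
  | cons x xs ih =>
    cases xs with
    | nil => simp [pvPrefixSumsFrom]
    | cons y ys => simpa [pvPrefixSumsFrom] using ih (s + x) (by simp)

theorem solve_snd (a : List Int) (m : Int) : (pvSolve a m).2 = a.foldl max m := by
  induction a, m using pvSolve.induct with
  | case1 m => simp [pvSolve]
  | case2 m x => simp [pvSolve]
  | case3 m x y rest mid L ih1 ih1' ih2 =>
    simp only [mid, L] at ih2
    rw [pvSolve]
    simp only []
    rw [ih2, ih1']
    conv_rhs => rw [← List.take_append_drop (((x :: y :: rest).length) / 2) (x :: y :: rest)]
    rw [List.foldl_append]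

theorem solve_fst (a : List Int) (m : Int) :
    (pvSolve a m).1 = pvPrefixSumsFrom 0 (List.zipWith (· + ·) a (pvRunMaxFrom m a)) := by
  induction a, m using pvSolve.induct with
  | case1 m => simp [pvSolve, pvRunMaxFrom, pvPrefixSumsFrom]
  | case2 m x => simp [pvSolve, pvRunMaxFrom, pvPrefixSumsFrom]
  | case3 m x y rest mid L ih1 ih1' ih2 =>
    simp only [mid, L] at ih2
    rw [pvSolve]
    simp only []
    set md := (x :: y :: rest).length / 2 with hmd
    set ta := (x :: y :: rest).take md with hta
    set da := (x :: y :: rest).drop md with hda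
    have hmd1 : 1 ≤ md := by rw [hmd]; simp; omega
    have hta_ne : ta ≠ [] := by
      intro hcon
      rw [hta, List.take_eq_nil_iff] at hcon
      rcases hcon with h | h
      · omega
      · exact List.cons_ne_nil _ _ h
    have hsplit : (x :: y :: rest) = ta ++ da := by
      rw [hta, hda, List.take_append_drop]
    rw [solve_snd] at ih2 ⊢
    rw [ih2, ih1']
    have hzip : List.zipWith (· + ·) (x :: y :: rest) (pvRunMaxFrom m (x :: y :: rest))
        = List.zipWith (· + ·) ta (pvRunMaxFrom m ta)
          ++ List.zipWith (· + ·) da (pvRunMaxFrom (ta.foldl max m) da) := by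
      conv_lhs => rw [hsplit, runMax_append]
      rw [List.zipWith_append ((runMax_length m ta).symm)]
    rw [hzip, prefixSums_append]
    congr 1
    have hznel : List.zipWith (· + ·) ta (pvRunMaxFrom m ta) ≠ [] := by
      cases hcase : ta with
      | nil => exact absurd hcase hta_ne
      | cons u us => simp [pvRunMaxFrom]
    rw [prefixSums_getLastD 0 _ hznel, prefixSums_shift]
    simp

theorem aLoop_eq (nums : List Int) : ∀ (ma : List Int) (m : Int) (c ans : List Int),
    pvALoop nums ma m c ans
      = ans ++ pvPrefixSumsFrom (ans.getLastD 0)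
          (List.zipWith (· + ·) nums (pvRunMaxFrom m nums)) := by
  induction nums with
  | nil => intro ma m c ans; simp [pvALoop, pvRunMaxFrom, pvPrefixSumsFrom]
  | cons i rest ih =>
    intro ma m c ans
    simp only [pvALoop, pvRunMaxFrom, List.zipWith]
    rw [ih]
    simp [pvPrefixSumsFrom, List.append_assoc]

-- ===== VERDICT (by name: the statement is the Claim_ definition above) =====
theorem findPrefixScore_spec : Claim_equal_findPrefixScore := by
  intro nums _
  show findPrefixScore nums = findPrefixScore_alt nums
  rw [findPrefixScore, aLoop_eq, findPrefixScore_alt, solve_fst]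
  simp
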